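-- pv_equiv track=rewrite | github.com/pypi-data/pypi-mirror-403 | packages/epochly/epochly-0.1.1-cp312-cp312-macosx_15_0_arm64.whl/epochly/plugins/plugin_loader.py | validate_plugin_name
-- ===== SOURCE A (Python) =====
-- BLOCKED_PREFIXES = ("_", ".", "__")
--
-- def validate_plugin_name(name: str) -> bool:
--     """
--     Validate plugin name for security.
--
--     Args:
--         name: Plugin entry point name
--
--     Returns:
--         True if name is valid, False otherwise
--     """
--     if not name or not isinstance(name, str):
--         return False
--
--     # Block private/hidden plugins
--     for prefix in BLOCKED_PREFIXES:
--         if name.startswith(prefix):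
--             return False
--
--     # Basic name validation
--     if not name.replace("_", "").replace("-", "").isalnum():
--         return False
--
--     return True
-- ===== SOURCE B (Python) =====
-- def validate_plugin_name(name: str) -> bool:
--     """Validate plugin name: single character scan instead of replace+isalnum."""
--     if not name or not isinstance(name, str):
--         return False
--     if name[0] in "_.":
--         return False
--     has_alnum = False
--     for ch in name:
--         if ch.isalnum():
--             has_alnum = True
--         elif ch not in "-_":
--             return False
--     return has_alnum
-- ===== Notes on version B (the rewrite author's own statement) =====
-- stated objective: simpler
-- what changed: The blocked-prefix loop collapses to a first-character test and the replace('_','').replace('-','').isalnum() check becomes one scan over the characters that rejects any char that is neither alphanumeric nor '-'/'_' and tracks whether at least one alphanumeric char occurred.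
import Mathlib
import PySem

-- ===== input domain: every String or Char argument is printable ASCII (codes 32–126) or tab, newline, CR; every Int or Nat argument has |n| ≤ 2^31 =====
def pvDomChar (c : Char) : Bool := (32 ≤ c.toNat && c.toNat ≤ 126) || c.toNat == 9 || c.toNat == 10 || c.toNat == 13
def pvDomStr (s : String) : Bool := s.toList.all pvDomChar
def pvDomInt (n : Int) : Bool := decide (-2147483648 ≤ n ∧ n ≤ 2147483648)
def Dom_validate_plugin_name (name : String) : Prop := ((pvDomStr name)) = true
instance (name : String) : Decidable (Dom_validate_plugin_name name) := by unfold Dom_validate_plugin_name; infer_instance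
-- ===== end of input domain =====

-- B replaces A's blocked-prefix loop by a first-character test and the replace+isalnum check by one scan tracking "saw an alphanumeric" — simpler, same behaviour.


-- ===== PORT A =====
-- the `for prefix in BLOCKED_PREFIXES: if name.startswith(prefix): return False` loop
def pvBlockedLoop (s : List Char) : List (List Char) → Bool
  | [] => false
  | p :: ps => if PySem.Chars.startswith s p then true else pvBlockedLoop s ps

def validate_plugin_name (name : String) : Bool :=
  if name.toList.isEmpty then false          -- `not name`
  else if pvBlockedLoop name.toList [['_'], ['.'], ['_', '_']] then false
  else if !(PySem.Chars.strIsalnum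
        (PySem.Chars.replace (PySem.Chars.replace name.toList ['_'] []) ['-'] [])) then false
  else true

-- ===== PORT B =====
-- the `for ch in name` scan with the has_alnum flag
def pvScan : List Char → Bool → Bool
  | [], has => has
  | c :: cs, has =>
    if PySem.Chars.isalnum c then pvScan cs true
    else if c != '-' && c != '_' then false
    else pvScan cs has

def validate_plugin_name_alt (name : String) : Bool :=
  match name.toList with
  | [] => false                              -- `not name`
  | c :: _ =>
    if c == '_' || c == '.' then false       -- `name[0] in "_."`
    else pvScan name.toList false

-- ===== PRECONDITION & SPEC =====
def Spec_validate_plugin_name (name : String) (out : Bool) : Prop := out = validate_plugin_name_alt name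
instance (name : String) (out : Bool) : Decidable (Spec_validate_plugin_name name out) := by unfold Spec_validate_plugin_name; infer_instance

-- ===== CLAIM (what is proved, stated in full; the proofs are below) =====
def Claim_equal_validate_plugin_name : Prop := ∀ (name : String), Dom_validate_plugin_name name → Spec_validate_plugin_name name (validate_plugin_name name)

-- ===== LEMMAS AND PROOFS =====

-- replace s [c] [] removes every occurrence of c (fuel-indexed worker first)
lemma replace_go_filter (c : Char) (fuel : Nat) (l acc : List Char)
    (h : l.length ≤ fuel) :
    PySem.Chars.replace.go [c] [] fuel l acc = acc.reverse ++ l.filter (· != c) := by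
  induction fuel generalizing l acc with
  | zero =>
    cases l with
    | nil => simp [PySem.Chars.replace.go]
    | cons a t => simp at h
  | succ n ih =>
    cases l with
    | nil => simp [PySem.Chars.replace.go]
    | cons a t =>
      simp only [PySem.Chars.replace.go]
      by_cases hc : a = c
      · subst hc
        have : List.isPrefixOf [a] (a :: t) = true := by simp [List.isPrefixOf]
        rw [if_pos this]
        simp only [List.length_cons] at h
        simp only [List.length_singleton, List.drop_succ_cons, List.drop_zero,
          List.reverse_nil, List.nil_append]
        rw [ih t acc (by omega)]
        simp
      · have : List.isPrefixOf [c] (a :: t) = false := by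
          simp [List.isPrefixOf]
          exact fun hh => absurd hh.symm hc
        rw [this]
        simp only [Bool.false_eq_true, if_false]
        simp only [List.length_cons] at h
        rw [ih t (a :: acc) (by omega)]
        simp [hc]

lemma replace_filter (c : Char) (l : List Char) :
    PySem.Chars.replace l [c] [] = l.filter (· != c) := by
  simp [PySem.Chars.replace, replace_go_filter c l.length l [] le_rfl]

-- pvScan characterised
lemma pvScan_eq (l : List Char) (has : Bool) :
    pvScan l has =
      (l.all (fun c => PySem.Chars.isalnum c || c == '-' || c == '_')
        && (has || l.any PySem.Chars.isalnum)) := by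
  induction l generalizing has with
  | nil => simp [pvScan]
  | cons a t ih =>
    simp only [pvScan]
    by_cases ha : PySem.Chars.isalnum a = true
    · rw [if_pos ha, ih]
      simp [ha]
    · rw [if_neg ha]
      by_cases hd : a = '-'
      · subst hd
        simp only [bne_self_eq_false, Bool.false_and, Bool.false_eq_true, if_false]
        rw [ih]
        simp [ha]
      · by_cases hu : a = '_'
        · subst hu
          simp only [bne_self_eq_false, Bool.and_false, Bool.false_eq_true, if_false]
          rw [ih]
          simp [ha]
        · have : (a != '-' && a != '_') = true := by simp [hd, hu]
          rw [this]
          simp [List.all_cons, ha, hd, hu]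

-- the strIsalnum-of-doubly-filtered test equals B's scan result
lemma alnum_filter_eq_scan (l : List Char) :
    PySem.Chars.strIsalnum ((l.filter (· != '_')).filter (· != '-')) = pvScan l false := by
  rw [pvScan_eq, List.filter_filter, Bool.eq_iff_iff]
  simp only [PySem.Chars.strIsalnum, Bool.and_eq_true, Bool.not_eq_true', List.isEmpty_eq_false_iff,
    List.all_eq_true, List.any_eq_true, List.mem_filter, Bool.false_or, Bool.or_eq_true, beq_iff_eq,
    bne_iff_ne, ne_eq]
  constructor
  · rintro ⟨hne, hall⟩
    rcases List.exists_mem_of_ne_nil _ hne with ⟨c, hc⟩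
    have hcl := (List.mem_filter.mp hc).1
    have hcg := (List.mem_filter.mp hc).2
    simp only [Bool.and_eq_true, bne_iff_ne, ne_eq] at hcg
    refine ⟨fun a ha => ?_, ⟨c, hcl, hall c ⟨hcl, hcg⟩⟩⟩
    by_cases h1 : a = '-'
    · simp [h1]
    · by_cases h2 : a = '_'
      · simp [h2]
      · exact Or.inl (Or.inl (hall a ⟨ha, h1, h2⟩))
  · rintro ⟨hall, c, hcl, hca⟩
    have hcd : c ≠ '-' := fun h => by subst h; exact absurd hca (by decide)
    have hcu : c ≠ '_' := fun h => by subst h; exact absurd hca (by decide)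
    refine ⟨List.ne_nil_of_mem (List.mem_filter.mpr ⟨hcl, by simp [hcd, hcu]⟩), ?_⟩
    rintro a ⟨hal, had, hau⟩
    rcases hall a hal with (h | h) | h
    · exact h
    · exact absurd h had
    · exact absurd h hau

-- A's prefix loop on a nonempty string is a first-character test
lemma blocked_eq (c : Char) (cs : List Char) :
    pvBlockedLoop (c :: cs) [['_'], ['.'], ['_', '_']] = (c == '_' || c == '.') := by
  by_cases h1 : c = '_'
  · simp [pvBlockedLoop, PySem.Chars.startswith, List.isPrefixOf, h1]
  · by_cases h2 : c = '.'
    · simp [pvBlockedLoop, PySem.Chars.startswith, List.isPrefixOf, h2]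
    · have h1' : ('_' == c) = false := by simp; exact fun h => h1 h.symm
      have h2' : ('.' == c) = false := by simp; exact fun h => h2 h.symm
      simp [pvBlockedLoop, PySem.Chars.startswith, List.isPrefixOf, h1, h2, h1', h2']

-- ===== VERDICT (by name: the statement is the Claim_ definition above) =====
theorem validate_plugin_name_spec : Claim_equal_validate_plugin_name := by
  intro name _
  unfold Spec_validate_plugin_name validate_plugin_name validate_plugin_name_alt
  cases hl : name.toList with
  | nil => simp
  | cons c cs =>
    simp only [List.isEmpty_cons, Bool.false_eq_true, if_false, blocked_eq,
      replace_filter, alnum_filter_eq_scan]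
    by_cases hb : (c == '_' || c == '.') = true
    · simp [hb]
    · simp only [hb, Bool.false_eq_true, if_false]
      cases pvScan (c :: cs) false <;> simp
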